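-- pv_equiv track=rewrite | github.com/CrossVideoReasoning/SYNCR | habitat/base_habitat.py | get_frame_ranges
-- ===== SOURCE A (Python) =====
-- def get_frame_ranges(frame_list, max_gap=1):
--     ranges = []
--     if not frame_list:
--         return ranges
--
--     start = frame_list[0]
--     prev = frame_list[0]
--
--     for frame in frame_list[1:]:
--         if frame <= prev + max_gap:
--             prev = frame
--         else:
--             ranges.append((start, prev))
--             start = frame
--             prev = frame
--
--     ranges.append((start, prev))
--     return ranges
-- ===== SOURCE B (Python) =====
-- def get_frame_ranges(frame_list, max_gap=1):
--     # staged: find the break pairs first, then assemble starts/ends and zip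
--     if not frame_list:
--         return []
--     breaks = [(a, b) for a, b in zip(frame_list, frame_list[1:]) if b > a + max_gap]
--     starts = [frame_list[0]] + [b for a, b in breaks]
--     ends = [a for a, b in breaks] + [frame_list[-1]]
--     return list(zip(starts, ends))
-- ===== Notes on version B (the rewrite author's own statement) =====
-- stated objective: alternative
-- what changed: B is staged instead of stateful: it first collects the break pairs (adjacent elements whose gap exceeds max_gap) via zip-with-next, then assembles the start list (first element plus each break's right value), the end list (each break's left value plus the last element), and zips them; A carries a (ranges,start,prev) accumulator through one loop.
import Mathlib
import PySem

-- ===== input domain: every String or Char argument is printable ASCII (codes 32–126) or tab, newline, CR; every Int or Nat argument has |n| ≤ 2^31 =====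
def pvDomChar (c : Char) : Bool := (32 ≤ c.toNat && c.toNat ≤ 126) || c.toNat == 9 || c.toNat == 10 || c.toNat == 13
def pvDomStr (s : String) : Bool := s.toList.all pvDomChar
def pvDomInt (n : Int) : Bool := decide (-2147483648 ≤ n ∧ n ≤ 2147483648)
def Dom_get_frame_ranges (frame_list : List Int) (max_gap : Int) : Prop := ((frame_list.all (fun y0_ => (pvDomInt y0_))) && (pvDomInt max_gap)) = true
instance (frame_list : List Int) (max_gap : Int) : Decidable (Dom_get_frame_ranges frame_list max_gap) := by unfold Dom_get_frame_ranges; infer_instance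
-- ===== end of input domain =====

-- B is staged instead of stateful: collect break pairs by zip-with-next, then assemble
-- start/end lists and zip them, instead of A's single (ranges, start, prev) accumulator loop.


-- ===== PORT A =====
-- A's loop body: state is (ranges, start, prev)
def pvAStep (max_gap : Int) (s : List (Int × Int) × Int × Int) (frame : Int) :
    List (Int × Int) × Int × Int :=
  if frame ≤ s.2.2 + max_gap then (s.1, s.2.1, frame)
  else (s.1 ++ [(s.2.1, s.2.2)], frame, frame)

def get_frame_ranges (frame_list : List Int) (max_gap : Int) : List (Int × Int) :=
  match frame_list with
  | [] => []
  | x :: rest =>         -- frame_list[0] twice, loop over frame_list[1:] (= rest)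
    let st := rest.foldl (pvAStep max_gap) ([], x, x)
    st.1 ++ [(st.2.1, st.2.2)]

-- ===== PORT B =====
def get_frame_ranges_alt (frame_list : List Int) (max_gap : Int) : List (Int × Int) :=
  match frame_list with
  | [] => []
  | x :: t =>
    -- zip(frame_list, frame_list[1:]) = (x::t).zip t; list is nonempty here so
    -- frame_list[0] = x and frame_list[-1] = getLastD (exact on nonempty lists)
    let breaks := ((x :: t).zip t).filter (fun ab => decide (ab.2 > ab.1 + max_gap))
    let starts := x :: breaks.map (fun ab => ab.2)
    let ends := breaks.map (fun ab => ab.1) ++ [(x :: t).getLastD 0]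
    starts.zip ends

-- ===== PRECONDITION & SPEC =====
def Spec_get_frame_ranges (frame_list : List Int) (max_gap : Int) (out : List (Int × Int)) : Prop := out = get_frame_ranges_alt frame_list max_gap
instance (frame_list : List Int) (max_gap : Int) (out : List (Int × Int)) : Decidable (Spec_get_frame_ranges frame_list max_gap out) := by unfold Spec_get_frame_ranges; infer_instance

-- ===== CLAIM (what is proved, stated in full; the proofs are below) =====
def Claim_equal_get_frame_ranges : Prop := ∀ (frame_list : List Int) (max_gap : Int), Dom_get_frame_ranges frame_list max_gap → Spec_get_frame_ranges frame_list max_gap (get_frame_ranges frame_list max_gap)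

-- ===== LEMMAS AND PROOFS =====

-- common reference recursion: the runs of (start, prev, remaining frames)
def pvRuns (g : Int) : Int → Int → List Int → List (Int × Int)
  | s, p, [] => [(s, p)]
  | s, p, y :: t => if y ≤ p + g then pvRuns g s y t else (s, p) :: pvRuns g y y t

-- A's foldl computes pvRuns appended to the accumulated ranges
lemma pvA_eq_runs (g : Int) :
    ∀ (t : List Int) (rs : List (Int × Int)) (s p : Int),
      (t.foldl (pvAStep g) (rs, s, p)).1 ++
        [((t.foldl (pvAStep g) (rs, s, p)).2.1, (t.foldl (pvAStep g) (rs, s, p)).2.2)] =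
      rs ++ pvRuns g s p t := by
  intro t
  induction t with
  | nil => intro rs s p; simp [pvRuns]
  | cons y t ih =>
    intro rs s p
    simp only [List.foldl_cons, pvAStep, pvRuns]
    by_cases h : y ≤ p + g
    · simp only [if_pos h]; exact ih rs s y
    · simp only [if_neg h]
      rw [ih (rs ++ [(s, p)]) y y]
      simp

-- the tail and the end value of pvRuns do not depend on the start argument
lemma pvRuns_shape (g : Int) :
    ∀ (t : List Int) (p : Int), ∃ b r,
      ∀ s, pvRuns g s p t = (s, b) :: r := by
  intro t
  induction t with
  | nil => intro p; exact ⟨p, [], fun s => rfl⟩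
  | cons y t ih =>
    intro p
    by_cases h : y ≤ p + g
    · obtain ⟨b, r, hr⟩ := ih y
      exact ⟨b, r, fun s => by simp [pvRuns, if_pos h, hr s]⟩
    · exact ⟨p, pvRuns g y y t, fun s => by simp [pvRuns, if_neg h]⟩

-- B's staged construction computes pvRuns
lemma pvB_eq_runs (g : Int) :
    ∀ (t : List Int) (x : Int),
      ((x :: (((x :: t).zip t).filter (fun ab => decide (ab.2 > ab.1 + g))).map
          (fun ab => ab.2)).zip
        ((((x :: t).zip t).filter (fun ab => decide (ab.2 > ab.1 + g))).map
          (fun ab => ab.1) ++ [(x :: t).getLastD 0])) =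
      pvRuns g x x t := by
  intro t
  induction t with
  | nil => intro x; simp [pvRuns]
  | cons y t ih =>
    intro x
    have hzip : ((x :: y :: t).zip (y :: t)) = (x, y) :: ((y :: t).zip t) := by simp
    have hlast : (x :: y :: t).getLastD 0 = (y :: t).getLastD 0 := by
      simp [List.getLastD]
    rw [hzip, hlast]
    by_cases h : y ≤ x + g
    · have hb : ¬ (y > x + g) := by omega
      simp only [List.filter_cons, decide_eq_true_eq, if_neg hb]
      -- same break list and ends as for (y :: t); only the first start changes from y to x
      have hiy := ih y
      obtain ⟨b, r, hr⟩ := pvRuns_shape g t y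
      -- ends list is nonempty, so both zips expose their heads
      set B := (((y :: t).zip t).filter (fun ab => decide (ab.2 > ab.1 + g))) with hB
      have hx : pvRuns g x x (y :: t) = pvRuns g x y t := by
        simp only [pvRuns, if_pos h]
      rw [hx, hr x]
      rw [hr y] at hiy
      -- peel the head of the zip in hiy and in the goal
      cases hE : (B.map (fun ab => ab.1) ++ [(y :: t).getLastD 0]) with
      | nil => simp at hE
      | cons e es =>
        rw [hE] at hiy
        simp only [List.zip_cons_cons] at hiy ⊢
        obtain ⟨h1, h2⟩ := List.cons_eq_cons.mp hiy
        rw [((Prod.mk.injEq _ _ _ _).mp h1).2, h2]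
    · have hb : (y > x + g) := by omega
      simp only [List.filter_cons, decide_eq_true_eq, if_pos hb]
      simp only [List.map_cons, List.cons_append, List.zip_cons_cons]
      rw [ih y]
      simp [pvRuns, if_neg h]

-- ===== VERDICT (by name: the statement is the Claim_ definition above) =====
theorem get_frame_ranges_spec : Claim_equal_get_frame_ranges := by
  intro frame_list max_gap _
  unfold Spec_get_frame_ranges
  cases frame_list with
  | nil => rfl
  | cons x t =>
    show get_frame_ranges (x :: t) max_gap = get_frame_ranges_alt (x :: t) max_gap
    unfold get_frame_ranges get_frame_ranges_alt
    simp only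
    rw [pvA_eq_runs max_gap t [] x x, pvB_eq_runs max_gap t x]
    simp
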